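/-
  MACHINE-WORD LEMMAS, SECOND PART: signed compares against a loaded int, 32-bit adds, row addressing, the interlace tables, a count plus one.
  What the interlace loops of DGifSlurp (segments 7 and 8) and every loop with an `int` counter held in a WHOLE register meet beyond
  Gif/Spec/Words.lean. LOOK IN Words.lean FIRST: the forms below are only those that are not there.

  A SIGNED COMPARE AGAINST A LOADED int (`cmp DWORD PTR [m], r32 ; jle / jg`, the load rewritten to the number `x`): the branch fact is
  `¬ (BitVec.ofNat 32 x).toInt ≤ (Word.part .w32 r).toInt`. Both sides are in Words.lean:
      cnt32_toInt x               x < 2 ^ 31 → (BitVec.ofNat 32 x).toInt = x                      (the loaded number)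
      part32_toInt_small r        r.toNat < 2 ^ 31 → (Word.part .w32 r).toInt = r.toNat            (the register)
      toNat_sext32 y              y.toNat < 2 ^ 31 → (Word.ofBV (signExtend 64 y)).toNat = y.toNat (`movsxd` of any 32-bit value)
  `rw [cnt32_toInt x hx, part32_toInt_small _ hr] at hbr_<addr>`, then `omega`.

  §1  32-BIT ADDS ON A WHOLE REGISTER                                                                   namespace Gif.Spec
      add32 w x                   w.toNat + x.toNat < 2 ^ 32 → (Word.ofBV (Word.part .w32 w + x)).toNat = w.toNat + x.toNat
                                  (`add r32, imm` / `add r32, [m32]` on a register that holds a number below 2 ^ 32: `i++` with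
                                  `x = 1#32`, `j += InterlacedJumps[i]` with `x = BitVec.ofNat 32 J`; Words.lean's `cnt32_add` is the
                                  same for a register generalised as `UInt64.ofNat i`)
  §2  ROW ADDRESSING (`Line = RasterBits + j · Width`)
      row_in W Ht j               1 ≤ W, j < Ht → W · j + W ≤ W · Ht ∧ W ≤ W · Ht ∧ Ht ≤ W · Ht
                                  (the only nonlinear facts of a row: `omega` takes `W * j` as an atom afterwards)
      row_addr W j r w13          `mov esi, [Width] ; imul esi, r13d ; movsxd rsi, esi ; add rsi, [RasterBits]` is `r + W · j`
  §3  THE INTERLACE TABLES (`Consts.jumps`, `Consts.offs`: registered globals of 4 `int`s; `i ≤ 3`)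
      Consts.jump_le hc i         ∃ J, rd mem (141300H + 4 i) 4 = J ∧ 1 ≤ J ∧ J ≤ 8       (`InterlacedJumps[i]` ∈ {8, 8, 4, 2})
      jump_addr w                 w.toNat ≤ 3 → (Word.ofBV (signExtend 64 (Word.part .w32 w)) * 4 + 141300H).toNat = 141300H + 4 · w.toNat
                                  (`movsxd rbx, r15d ; mov eax, [rbx*4 + 141300H]`: the walker's own form of the address)
      Consts.offs_le hc i         ∃ J, rd mem (141340H + 4 i) 4 = J ∧ J ≤ 4                (`InterlacedOffset[i]` ∈ {0, 4, 2, 1})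
      offs_addr w                 the same address form for 141340H
  HOW TO USE §3 (no case split on `i`): `obtain ⟨J, hJ, hJ1, hJ8⟩ := hconsts.jump_le i hi`, `have ha := jump_addr (v.reg .r15) hi`, the load as
  a fact in the walker's form `l_j : mem.readLE (Word.ofBV (BitVec.signExtend 64 (Word.part .w32 (v.reg .r15))) * 4 + 0x141300) 4 = J`
  by `rw [rd_eq_readLE mem _ (0x141300 + 4 * i) 4 ha]; exact hJ`; the check's two bounds by `rw [ha]`, `show`, `omega`.
  §4  A COUNT PLUS ONE, A LENGTH ZERO-EXTENDED (the heap's clients: `count + 1` as an argument, `++count` stored, `Len` as `mov r32, r32`)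
      succ32 n                    n + 1 < 2 ^ 32 → (setWidth 32 (UInt64.ofNat n + 1).toBitVec).toNat = n + 1
                                  (`lea edx, [rax + 1] ; mov [m32], edx`: the dword stored, as a number; Words.lean's `lea32_succ`
                                  is the same for a register that is not generalised as `UInt64.ofNat n`)
      succ32_sext n               n + 1 < 2 ^ 31 → Word.ofBV (signExtend 64 (setWidth 32 (UInt64.ofNat n + 1).toBitVec)) = UInt64.ofNat (n + 1)
                                  (`lea esi, [rax + 1] ; movsxd rsi, esi`: the `Word` equation for the walker's facts list)
      cnt32_zext i                i < 2 ^ 32 → Word.ofBV (Word.part .w32 (UInt64.ofNat i)) = UInt64.ofNat i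
                                  (`mov edx, r12d` of a register that holds the number `i`: the `Word` equation)
  No `sorry`, no axiom, no `bv_decide`, no `native_decide`.
-/
import Gif.Spec.Words
import Gif.Spec.Common
namespace Gif.Spec
open X86 X86.User Asan ProgX

/-! ### §1 32-bit adds on a whole register -/

/-- **`add r32, x` on a register that holds a number below `2 ^ 32`, without carry**: the register (zero-extended by the 32-bit
write) holds the sum of the numbers. `i++` is `x = 1#32`; `j += table[i]` is `x = BitVec.ofNat 32 J` (with
`toNat_ofNat32 J` for `x.toNat`). -/
theorem add32 (w : Word) (x : BitVec 32) (h : w.toNat + x.toNat < 2 ^ 32) :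
    (Word.ofBV (Word.part .w32 w + x)).toNat = w.toNat + x.toNat := by
  have e : (Word.part .w32 w).toNat = w.toNat % 2 ^ 32 := toNat_part32 w
  rw [toNat_ofBV32, BitVec.toNat_add, e]
  omega

/-! ### §2 Row addressing -/

/-- **Row `j < Ht` of a raster of `W · Ht` bytes lies inside it**, and so do the factors: `W ≤ n`, `Ht ≤ n`. The only nonlinear
facts a row needs; with them in the context `omega` closes the bounds of DGifGetLine's buffer (`W * j` is an atom). -/
theorem row_in (W Ht j : Nat) (hW : 1 ≤ W) (hj : j < Ht) : W * j + W ≤ W * Ht ∧ W ≤ W * Ht ∧ Ht ≤ W * Ht := by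
  have h1 : W * j + W = W * (j + 1) := by
    rw [Nat.mul_succ]
  have h2 : W * (j + 1) ≤ W * Ht := Nat.mul_le_mul_left W hj
  have h3 : W * 1 ≤ W * Ht := Nat.mul_le_mul_left W (by omega)
  have h4 : 1 * Ht ≤ W * Ht := Nat.mul_le_mul_right Ht hW
  omega

/-- **The address of row `j`**: `mov esi, [Width] ; imul esi, r13d ; movsxd rsi, esi ; add rsi, [RasterBits]` with the two loads
rewritten to the numbers `W` and `r`, `r13 = j`, `W · j < 2 ^ 31` (no overflow of the `imul`): `r + W · j`. -/
theorem row_addr (W j r : Nat) (w13 : Word) (hj : w13.toNat = j) (hW : W < 2 ^ 31) (hWj : W * j < 2 ^ 31)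
    (hr : r + W * j < 2 ^ 64) :
    (Word.ofBV (BitVec.signExtend 64 (BitVec.ofNat 32 W * Word.part .w32 w13)) + UInt64.ofNat r).toNat = r + W * j := by
  have hj32 : j < 2 ^ 32 ∨ W = 0 := by
    by_cases h0 : W = 0
    · exact Or.inr h0
    · left
      have hle : 1 * j ≤ W * j := Nat.mul_le_mul_right j (by omega)
      omega
  have e1 : (BitVec.ofNat 32 W).toNat = W := toNat_ofNat32 W (by omega)
  have e2 : (Word.part .w32 w13).toNat = j % 2 ^ 32 := by
    rw [toNat_part32, hj]
  have e3 : (BitVec.ofNat 32 W * Word.part .w32 w13).toNat = W * j := by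
    rw [BitVec.toNat_mul, e1, e2]
    rcases hj32 with hlt | h0
    · rw [Nat.mod_eq_of_lt hlt]
      exact Nat.mod_eq_of_lt (by omega)
    · subst h0
      simp only [Nat.zero_mul, Nat.zero_mod]
  rw [UInt64.toNat_add, toNat_sext32 _ (by omega), e3, UInt64.toNat_ofNat']
  omega

/-! ### §3 The interlace tables -/

/-- **`InterlacedJumps[i]`, `i ≤ 3`, is between 1 and 8** (`Consts.jumps`: 8, 8, 4, 2). What `j += InterlacedJumps[i]` needs: the row
loop's measure goes down and `j` stays below `2 ^ 31`. -/
theorem Consts.jump_le {mem : Mem} (hc : Consts mem) (i : Nat) (hi : i ≤ 3) :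
    ∃ J, rd mem (0x141300 + 4 * i) 4 = J ∧ 1 ≤ J ∧ J ≤ 8 := by
  obtain ⟨j0, j1, j2, j3⟩ := hc.jumps
  have hcases : i = 0 ∨ i = 1 ∨ i = 2 ∨ i = 3 := by omega
  rcases hcases with e | e | e | e
  · subst e
    exact ⟨8, j0, by omega, by omega⟩
  · subst e
    exact ⟨8, j1, by omega, by omega⟩
  · subst e
    exact ⟨4, j2, by omega, by omega⟩
  · subst e
    exact ⟨2, j3, by omega, by omega⟩

/-- **`InterlacedOffset[i]`, `i ≤ 3`, is at most 4** (`Consts.offs`: 0, 4, 2, 1). What `j = InterlacedOffset[i]` needs: `j` is not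
negative as an `int` (`RowHead.row_int`). -/
theorem Consts.offs_le {mem : Mem} (hc : Consts mem) (i : Nat) (hi : i ≤ 3) :
    ∃ J, rd mem (0x141340 + 4 * i) 4 = J ∧ J ≤ 4 := by
  obtain ⟨o0, o1, o2, o3⟩ := hc.offs
  have hcases : i = 0 ∨ i = 1 ∨ i = 2 ∨ i = 3 := by omega
  rcases hcases with e | e | e | e
  · subst e
    exact ⟨0, o0, by omega⟩
  · subst e
    exact ⟨4, o1, by omega⟩
  · subst e
    exact ⟨2, o2, by omega⟩
  · subst e
    exact ⟨1, o3, by omega⟩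

/-- The address of element `i ≤ 3` of a table of `int`s at `base`, in the walker's own form for `movsxd rbx, r32 ;
mov eax, [rbx*4 + base]` (index first, then the displacement). -/
theorem table4_addr (w base : Word) (h : w.toNat ≤ 3) (hb : base.toNat + 16 < 2 ^ 64) :
    (Word.ofBV (BitVec.signExtend 64 (Word.part .w32 w)) * 4 + base).toNat = base.toNat + 4 * w.toNat := by
  have e1 : Word.ofBV (BitVec.signExtend 64 (Word.part .w32 w)) = w := sext32_small w (by omega)
  have e4 : (4 : UInt64).toNat = 4 := rfl
  rw [e1, UInt64.toNat_add, UInt64.toNat_mul, e4]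
  omega

/-- **The address of `InterlacedJumps[i]`**: `movsxd rbx, r15d ; mov eax, [rbx*4 + 141300H]` with `i ≤ 3`. The same term is the
address of the load's `check_` goal and of the load itself (`rd_eq_readLE`). -/
theorem jump_addr (w : Word) (h : w.toNat ≤ 3) :
    (Word.ofBV (BitVec.signExtend 64 (Word.part .w32 w)) * 4 + 0x141300).toNat = 0x141300 + 4 * w.toNat := by
  have hb : (0x141300 : Word).toNat = 0x141300 := rfl
  rw [table4_addr w 0x141300 h (by rw [hb]; omega), hb]

/-- **The address of `InterlacedOffset[i]`**: `movsxd rbx, r15d ; mov r13d, [rbx*4 + 141340H]` with `i ≤ 3`. -/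
theorem offs_addr (w : Word) (h : w.toNat ≤ 3) :
    (Word.ofBV (BitVec.signExtend 64 (Word.part .w32 w)) * 4 + 0x141340).toNat = 0x141340 + 4 * w.toNat := by
  have hb : (0x141340 : Word).toNat = 0x141340 := rfl
  rw [table4_addr w 0x141340 h (by rw [hb]; omega), hb]

/-! ### §4 A count plus one, a length zero-extended -/

/-- **The dword that `lea edx, [rax + 1] ; mov [m32], edx` stores** when `rax` holds the number `n` (`(*count)++` with the count
loaded and generalised as `UInt64.ofNat n`): `n + 1`. Rewrite the walker's `w_mem` with it before reading the count back. -/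
theorem succ32 (n : Nat) (h : n + 1 < 2 ^ 32) :
    (BitVec.setWidth 32 (UInt64.ofNat n + 1).toBitVec).toNat = n + 1 := by
  have e1 : (1 : UInt64).toNat = 1 := rfl
  rw [BitVec.toNat_setWidth, UInt64.toNat_toBitVec, UInt64.toNat_add, UInt64.toNat_ofNat', e1]
  omega

/-- **`lea esi, [rax + 1] ; movsxd rsi, esi`** when `rax` holds the number `n` and `n + 1` is an `int` (`count + 1` as the second
argument of `reallocarray`): the number `n + 1`. A `Word` equation for the facts list of `u_walk` (next to `cnt32_ofBV n`, which
turns the loaded count into `UInt64.ofNat n` first). -/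
theorem succ32_sext (n : Nat) (h : n + 1 < 2 ^ 31) :
    Word.ofBV (BitVec.signExtend 64 (BitVec.setWidth 32 (UInt64.ofNat n + 1).toBitVec)) = UInt64.ofNat (n + 1) := by
  have e2 : (BitVec.setWidth 32 (UInt64.ofNat n + 1).toBitVec).toNat = n + 1 := succ32 n (by omega)
  apply UInt64.toNat_inj.mp
  rw [toNat_sext32 _ (by omega), e2, UInt64.toNat_ofNat']
  omega

/-- **`mov r32, r32` of a register that holds the number `i`** (`mov edx, r12d`: `Len` as the third argument of `memcpy`): the
zero-extension is the number itself. A `Word` equation for the facts list of `u_walk`. -/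
theorem cnt32_zext (i : Nat) (h : i < 2 ^ 32) : Word.ofBV (Word.part .w32 (UInt64.ofNat i)) = UInt64.ofNat i := by
  rw [cnt32_part, cnt32_ofBV i h]

end Gif.Spec
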